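-- pv_equiv track=rewrite | github.com/BIH-CEI/SenologieOnFHIR | scripts/_patch_notebook_pathling.py | as_source
-- ===== SOURCE A (Python) =====
-- def as_source(text: str) -> list[str]:
--     lines = text.split("\n")
--     out: list[str] = []
--     for i, ln in enumerate(lines):
--         if i < len(lines) - 1:
--             out.append(ln + "\n")
--         else:
--             if ln != "":
--                 out.append(ln)
--     return out
-- ===== SOURCE B (Python) =====
-- def as_source(text: str) -> list[str]:
--     out: list[str] = []
--     buf: list[str] = []
--     for ch in text:
--         buf.append(ch)
--         if ch == "\n":
--             out.append("".join(buf))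
--             buf = []
--     if buf:
--         out.append("".join(buf))
--     return out
-- ===== Notes on version B (the rewrite author's own statement) =====
-- stated objective: alternative
-- what changed: Replaces the split-on-newline pass followed by an index-checked enumerate loop that re-attaches separators with a single character scan that accumulates a buffer, flushing it at each newline and once at the end if non-empty.
import Mathlib
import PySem

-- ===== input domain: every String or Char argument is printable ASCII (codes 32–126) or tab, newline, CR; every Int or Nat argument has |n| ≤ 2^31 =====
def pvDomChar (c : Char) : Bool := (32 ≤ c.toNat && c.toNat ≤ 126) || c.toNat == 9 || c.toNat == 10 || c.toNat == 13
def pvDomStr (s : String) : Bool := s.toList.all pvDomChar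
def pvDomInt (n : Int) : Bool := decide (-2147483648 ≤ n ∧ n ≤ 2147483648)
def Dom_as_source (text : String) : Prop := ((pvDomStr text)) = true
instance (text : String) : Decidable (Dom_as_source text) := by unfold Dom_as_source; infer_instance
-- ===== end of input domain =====

-- B replaces the split-on-newline pass plus index-checked enumerate loop by a single
-- character scan with a flush-on-newline buffer (alternative decomposition, same cost).

-- ===== PORT A =====
def as_source (text : String) : List String :=
  let lines := (PySem.Str.split? text "\n").getD []
  (PySem.List.enumerate lines 0).foldl
    (fun out p =>
      if p.1 < (lines.length : Int) - 1 then out ++ [p.2 ++ "\n"]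
      else if p.2 ≠ "" then out ++ [p.2] else out) []

-- ===== PORT B =====
def as_source_alt (text : String) : List String :=
  let r := text.toList.foldl
    (fun (st : List String × List Char) ch =>
      let buf := st.2 ++ [ch]
      if ch = '\n' then (st.1 ++ [String.ofList buf], []) else (st.1, buf))
    ([], [])
  if r.2 ≠ [] then r.1 ++ [String.ofList r.2] else r.1

-- ===== PRECONDITION & SPEC =====
def Spec_as_source (text : String) (out : List String) : Prop := out = as_source_alt text
instance (text : String) (out : List String) : Decidable (Spec_as_source text out) := by unfold Spec_as_source; infer_instance

-- ===== CLAIM (what is proved, stated in full; the proofs are below) =====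
def Claim_equal_as_source : Prop := ∀ (text : String), Dom_as_source text → Spec_as_source text (as_source text)

-- ===== LEMMAS AND PROOFS =====

/-- `text.split("\n")` as a plain structural recursion on the characters. -/
def splitOn1 : List Char → List (List Char)
  | [] => [[]]
  | c :: cs => if c = '\n' then [] :: splitOn1 cs else (splitOn1 cs).modifyHead (c :: ·)

/-- Re-attach the '\n' separators: all pieces but the last get '\n', an empty last piece is dropped. -/
def glueSC : List (List Char) → List String
  | [] => []
  | [l] => if l ≠ [] then [String.ofList l] else []
  | l :: rest => String.ofList (l ++ ['\n']) :: glueSC rest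

/-- String-level version of `glueSC` (the shape A's loop produces). -/
def glueS : List String → List String
  | [] => []
  | [ln] => if ln ≠ "" then [ln] else []
  | ln :: rest => (ln ++ "\n") :: glueS rest

/-- B's scan as a recursion carrying the pending buffer. -/
def scanB : List Char → List Char → List String
  | buf, [] => if buf ≠ [] then [String.ofList buf] else []
  | buf, c :: cs => if c = '\n' then String.ofList (buf ++ [c]) :: scanB [] cs else scanB (buf ++ [c]) cs

lemma splitOn1_ne_nil (s : List Char) : splitOn1 s ≠ [] := by
  induction s with
  | nil => simp [splitOn1]
  | cons c cs ih =>
    simp only [splitOn1]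
    split_ifs
    · simp
    · cases h : splitOn1 cs with
      | nil => exact absurd h ih
      | cons a t => simp [List.modifyHead]

lemma splitOn_go_spec (l : List Char) (cur : List Char) (acc : List (List Char)) (fuel : Nat)
    (h : l.length < fuel) :
    PySem.Chars.splitOn.go ['\n'] fuel l cur acc =
      acc.reverse ++ ((splitOn1 l).modifyHead (cur.reverse ++ ·)) := by
  induction l generalizing cur acc fuel with
  | nil =>
    cases fuel with
    | zero => omega
    | succ f => simp [PySem.Chars.splitOn.go, splitOn1]
  | cons c cs ih =>
    cases fuel with
    | zero => omega
    | succ f =>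
      by_cases hc : c = '\n'
      · subst hc
        rw [PySem.Chars.splitOn.go]
        simp only [List.isPrefixOf, List.length]
        rw [if_pos (by simp)]
        simp only [List.drop_succ_cons, List.drop_zero]
        rw [ih _ _ _ (by simp at h ⊢; omega)]
        obtain ⟨a, t, ht⟩ : ∃ a t, splitOn1 cs = a :: t := by
          cases hh : splitOn1 cs with
          | nil => exact absurd hh (splitOn1_ne_nil cs)
          | cons a t => exact ⟨a, t, rfl⟩
        simp [splitOn1, ht, List.modifyHead]
      · rw [PySem.Chars.splitOn.go]
        rw [if_neg (by simp [List.isPrefixOf]; intro hh; exact hc hh.symm)]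
        rw [ih _ _ _ (by simp at h ⊢; omega)]
        obtain ⟨a, t, ht⟩ : ∃ a t, splitOn1 cs = a :: t := by
          cases hh : splitOn1 cs with
          | nil => exact absurd hh (splitOn1_ne_nil cs)
          | cons a t => exact ⟨a, t, rfl⟩
        simp [splitOn1, hc, ht, List.modifyHead]

lemma splitOn_eq (s : List Char) : PySem.Chars.splitOn s ['\n'] = splitOn1 s := by
  rw [PySem.Chars.splitOn, splitOn_go_spec s [] [] (s.length + 1) (by omega)]
  obtain ⟨a, t, ht⟩ : ∃ a t, splitOn1 s = a :: t := by
    cases hh : splitOn1 s with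
    | nil => exact absurd hh (splitOn1_ne_nil s)
    | cons a t => exact ⟨a, t, rfl⟩
  simp [ht, List.modifyHead]

lemma A_fold (xs : List String) (s : Int) (out : List String) (n : Int)
    (hn : s + xs.length = n) :
    (PySem.List.enumerate xs s).foldl
      (fun out p =>
        if p.1 < n - 1 then out ++ [p.2 ++ "\n"]
        else if p.2 ≠ "" then out ++ [p.2] else out) out
    = out ++ glueS xs := by
  induction xs generalizing s out with
  | nil => simp [glueS]
  | cons x xs ih =>
    rw [PySem.List.enumerate_cons]
    cases xs with
    | nil =>
      simp only [List.length_cons, List.length_nil] at hn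
      rw [List.foldl_cons]
      simp only [PySem.List.enumerate_nil, List.foldl_nil]
      rw [if_neg (by omega)]
      simp [glueS]
      split_ifs <;> simp
    | cons y ys =>
      rw [List.foldl_cons]
      rw [if_pos (by simp only [List.length_cons] at hn; push_cast at hn ⊢; omega)]
      rw [ih (s + 1) _ (by simp only [List.length_cons] at hn ⊢; push_cast at hn ⊢; omega)]
      simp [glueS]

lemma B_fold (s : List Char) (out : List String) (buf : List Char) :
    (let r := s.foldl
        (fun (st : List String × List Char) ch =>
          let b := st.2 ++ [ch]
          if ch = '\n' then (st.1 ++ [String.ofList b], []) else (st.1, b)) (out, buf)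
     if r.2 ≠ [] then r.1 ++ [String.ofList r.2] else r.1)
    = out ++ scanB buf s := by
  induction s generalizing out buf with
  | nil => simp only [List.foldl_nil, scanB]; split_ifs <;> simp
  | cons c cs ih =>
    simp only [List.foldl_cons]
    by_cases hc : c = '\n'
    · subst hc
      simp only [scanB]
      rw [ih]
      simp
    · simp only [if_neg hc, scanB]
      exact ih out (buf ++ [c])

lemma scan_eq (s : List Char) (buf : List Char) :
    scanB buf s = glueSC ((splitOn1 s).modifyHead (buf ++ ·)) := by
  induction s generalizing buf with
  | nil => simp [scanB, splitOn1, glueSC, List.modifyHead]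
  | cons c cs ih =>
    obtain ⟨a, t, ht⟩ : ∃ a t, splitOn1 cs = a :: t := by
      cases hh : splitOn1 cs with
      | nil => exact absurd hh (splitOn1_ne_nil cs)
      | cons a t => exact ⟨a, t, rfl⟩
    by_cases hc : c = '\n'
    · subst hc
      simp only [scanB, splitOn1, List.modifyHead]
      rw [ih []]
      cases t with
      | nil => simp [ht, glueSC, List.modifyHead]
      | cons b bs => simp [ht, glueSC, List.modifyHead]
    · simp only [scanB, splitOn1, if_neg hc]
      rw [ih (buf ++ [c]), ht]
      simp [List.modifyHead]

lemma ofList_ne_empty_iff (l : List Char) : (String.ofList l ≠ "") ↔ l ≠ [] := by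
  constructor
  · intro h hl; subst hl; exact h rfl
  · intro h he
    apply h
    have := congrArg String.toList he
    simpa using this

lemma ofList_append_nl (l : List Char) :
    String.ofList l ++ "\n" = String.ofList (l ++ ['\n']) := by
  apply String.toList_injective
  simp [String.toList_append]

lemma glueS_map (ls : List (List Char)) :
    glueS (ls.map String.ofList) = glueSC ls := by
  induction ls with
  | nil => simp [glueS, glueSC]
  | cons l rest ih =>
    cases rest with
    | nil =>
      simp only [List.map_cons, List.map_nil, glueS, glueSC]
      by_cases h : l = []
      · subst h; simp
      · rw [if_pos ((ofList_ne_empty_iff l).mpr h), if_pos h]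
    | cons m ms =>
      simp only [List.map_cons, glueS, glueSC] at *
      rw [← ofList_append_nl]
      exact congrArg _ ih

lemma newline_toList : ("\n" : String).toList = ['\n'] := rfl

-- ===== VERDICT (by name: the statement is the Claim_ definition above) =====
theorem as_source_spec : Claim_equal_as_source := by
  intro text _
  unfold Spec_as_source
  show as_source text = as_source_alt text
  unfold as_source as_source_alt
  rw [B_fold text.toList [] []]
  rw [scan_eq]
  have hsplit : PySem.Str.split? text "\n"
      = some ((splitOn1 text.toList).map String.ofList) := by
    rw [PySem.Str.split?]
    rw [show PySem.Chars.split? text.toList ("\n".toList)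
        = some (splitOn1 text.toList) by
      rw [PySem.Chars.split?, newline_toList]
      rw [if_neg (by simp)]
      rw [splitOn_eq]]
    rfl
  simp only [hsplit, Option.getD_some]
  rw [A_fold ((splitOn1 text.toList).map String.ofList) 0 []
      ((((splitOn1 text.toList).map String.ofList)).length : Int) (by simp)]
  rw [glueS_map]
  obtain ⟨a, t, ht⟩ : ∃ a t, splitOn1 text.toList = a :: t := by
    cases hh : splitOn1 text.toList with
    | nil => exact absurd hh (splitOn1_ne_nil _)
    | cons a t => exact ⟨a, t, rfl⟩
  simp [ht, List.modifyHead]
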